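-- pv_equiv track=rewrite | github.com/dcschenc/myleetcode | 2123-the-number-of-weak-characters-in-the-game/2123-the-number-of-weak-characters-in-the-game.py | numberOfWeakCharacters
-- ===== SOURCE A (Python) =====
-- from typing import List
--
-- def numberOfWeakCharacters(properties: List[List[int]]) -> int:
--     properties.sort(key=lambda x: (x[0], -x[1]))
--     ans = 0
--     max_defense = 0
--     for _, defense in properties[::-1]:
--         if max_defense > defense:
--             ans += 1
--         max_defense = max(max_defense, defense)
--     return ans
-- ===== SOURCE B (Python) =====
-- def numberOfWeakCharacters(properties):
--     # Note: unlike A, this does not sort `properties` in place; return value only.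
--     gm = {}
--     for a, d in properties:
--         gm[a] = max(gm.get(a, d), d)
--     suff = {}
--     best = 0
--     for a in sorted(gm, reverse=True):
--         suff[a] = best
--         best = max(best, gm[a])
--     return sum(1 for a, d in properties if d < suff[a])
-- ===== Notes on version B (the rewrite author's own statement) =====
-- stated objective: alternative
-- what changed: replaces A's sort-the-whole-list-then-reverse running-max scan by a group-max dict per attack, a suffix-max table built over the distinct attacks sorted descending, and a separate order-independent counting pass over the characters
import Mathlib
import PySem

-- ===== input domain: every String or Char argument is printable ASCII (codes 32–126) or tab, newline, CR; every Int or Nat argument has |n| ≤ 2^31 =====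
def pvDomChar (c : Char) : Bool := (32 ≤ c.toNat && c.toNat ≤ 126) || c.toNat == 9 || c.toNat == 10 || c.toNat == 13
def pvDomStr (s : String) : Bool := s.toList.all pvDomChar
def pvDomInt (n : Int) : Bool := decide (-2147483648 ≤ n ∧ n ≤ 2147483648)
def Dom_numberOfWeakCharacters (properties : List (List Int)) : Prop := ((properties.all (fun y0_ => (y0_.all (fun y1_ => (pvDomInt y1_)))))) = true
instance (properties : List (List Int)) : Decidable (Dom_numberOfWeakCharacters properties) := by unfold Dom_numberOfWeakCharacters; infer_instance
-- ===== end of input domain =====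

-- B replaces A's sort-whole-list + reverse running-max scan by a per-attack group-max dict, a
-- suffix-max table over the distinct attacks sorted descending, and a separate order-independent
-- counting pass (alternative decomposition, same cost).  A sorts `properties` in place, B does not:
-- the equivalence proved here is about the RETURN value only.

-- ===== PORT A =====
def numberOfWeakCharacters (properties : List (List Int)) : Int :=
  let sortedP := PySem.List.sorted2 properties
      (fun x => PySem.List.pyGetD x 0 0) (fun x => -(PySem.List.pyGetD x 1 0))
  -- properties[::-1]; a step of -1 never raises, so the getD [] branch is never taken
  let rev := (PySem.List.slice? sortedP none none (-1)).getD []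
  let res := rev.foldl (fun (st : Int × Int) row =>
      let d := PySem.List.pyGetD row 1 0
      (if st.2 > d then st.1 + 1 else st.1, max st.2 d)) (0, 0)
  res.1

-- ===== PORT B =====
def numberOfWeakCharacters_alt (properties : List (List Int)) : Int :=
  let gm := properties.foldl (fun (d : PySem.Dict Int Int) r =>
      let a := PySem.List.pyGetD r 0 0
      let dd := PySem.List.pyGetD r 1 0
      d.insert a (max (d.getD a dd) dd)) PySem.Dict.empty
  let ks := PySem.List.sorted gm.keys (fun k => k) true
  let sm := ks.foldl (fun (st : PySem.Dict Int Int × Int) a =>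
      (st.1.insert a st.2, max st.2 (gm.getD a 0))) (PySem.Dict.empty, 0)
  -- suff[a] in Python never raises (every attack is a key), so getD 0 is exact there
  properties.foldl (fun (acc : Int) r =>
      if PySem.List.pyGetD r 1 0 < (sm.1).getD (PySem.List.pyGetD r 0 0) 0 then acc + 1 else acc) 0

-- ===== PRECONDITION & SPEC =====
-- Pre_ excludes exactly the inputs on which Python A raises: a row that is not a 2-element
-- [attack, defense] pair (IndexError in the sort key / ValueError unpacking the row).
def Pre_numberOfWeakCharacters (properties : List (List Int)) : Prop :=
  ∀ r ∈ properties, r.length = 2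
instance (properties : List (List Int)) : Decidable (Pre_numberOfWeakCharacters properties) := by
  unfold Pre_numberOfWeakCharacters; infer_instance

def pvWitness_numberOfWeakCharacters : List (List Int) := [[1, 5], [10, 4], [4, 3]]

def Spec_numberOfWeakCharacters (properties : List (List Int)) (out : Int) : Prop := out = numberOfWeakCharacters_alt properties
instance (properties : List (List Int)) (out : Int) : Decidable (Spec_numberOfWeakCharacters properties out) := by unfold Spec_numberOfWeakCharacters; infer_instance

-- ===== CLAIM (what is proved, stated in full; the proofs are below) =====
def Claim_equal_numberOfWeakCharacters : Prop := ∀ (properties : List (List Int)), Dom_numberOfWeakCharacters properties → Pre_numberOfWeakCharacters properties → Spec_numberOfWeakCharacters properties (numberOfWeakCharacters properties)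

-- ===== LEMMAS AND PROOFS =====

-- row projections (attack, defense)
def pvAtt (r : List Int) : Int := PySem.List.pyGetD r 0 0
def pvDf (r : List Int) : Int := PySem.List.pyGetD r 1 0

-- the comparator sorted2 uses for A's key (x[0], -x[1])
def pvBefore (x y : List Int) : Bool :=
  decide (pvAtt x < pvAtt y) || (!decide (pvAtt y < pvAtt x) && decide (pvDf y < pvDf x))

-- order of the reversed sorted list: attack strictly decreasing, defense non-decreasing on ties
def pvRel (x y : List Int) : Prop := pvAtt y < pvAtt x ∨ (pvAtt x = pvAtt y ∧ pvDf x ≤ pvDf y)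

-- A's reverse scan, written as a recursion on the list
def pvCnt (m : Int) : List (List Int) → Int
  | [] => 0
  | r :: t => (if m > pvDf r then 1 else 0) + pvCnt (max m (pvDf r)) t

-- max of a list of values on top of a base
def pvMax (b : Int) (vs : List Int) : Int := vs.foldl max b

-- max m { defense of r | r ∈ l, attack r > q }
def pvBig (m : Int) (l : List (List Int)) (q : Int) : Int :=
  pvMax m ((l.filter (fun r => decide (q < pvAtt r))).map pvDf)

-- B's three stages, named (zeta-expanded bodies of the lets in the port of B)
def pvGm (props : List (List Int)) : PySem.Dict Int Int :=
  props.foldl (fun (d : PySem.Dict Int Int) r =>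
      d.insert (PySem.List.pyGetD r 0 0)
        (max (d.getD (PySem.List.pyGetD r 0 0) (PySem.List.pyGetD r 1 0)) (PySem.List.pyGetD r 1 0)))
    PySem.Dict.empty
def pvKs (props : List (List Int)) : List Int := PySem.List.sorted (pvGm props).keys (fun k => k) true
def pvSm (props : List (List Int)) : PySem.Dict Int Int × Int :=
  (pvKs props).foldl (fun st a => (st.1.insert a st.2, max st.2 ((pvGm props).getD a 0)))
    (PySem.Dict.empty, 0)

-- option-valued group max, the contents of pvGm at one key
def pvG (o : Option Int) (l : List (List Int)) (q : Int) : Option Int :=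
  l.foldl (fun o r => if pvAtt r = q then some (max (o.getD (pvDf r)) (pvDf r)) else o) o

lemma pvBefore_true_iff (x y : List Int) :
    pvBefore x y = true ↔ (pvAtt x < pvAtt y ∨ (pvAtt x = pvAtt y ∧ pvDf y < pvDf x)) := by
  simp only [pvBefore, Bool.or_eq_true, Bool.and_eq_true, Bool.not_eq_true',
    decide_eq_true_eq, decide_eq_false_iff_not]
  omega

lemma pvBefore_false_iff (x y : List Int) :
    pvBefore x y = false ↔ pvRel x y := by
  rw [← Bool.not_eq_true, pvBefore_true_iff]
  unfold pvRel
  omega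

lemma pvBefore_asymm {x y : List Int} (h : pvBefore x y = true) : pvBefore y x = false := by
  rw [pvBefore_true_iff] at h
  rw [pvBefore_false_iff]
  unfold pvRel
  omega

lemma pvBefore_trans' {x y z : List Int} (h1 : pvBefore x y = true)
    (h2 : pvBefore z y = false) : pvBefore z x = false := by
  rw [pvBefore_true_iff] at h1
  rw [pvBefore_false_iff] at h2 ⊢
  unfold pvRel at h2 ⊢
  omega

lemma pvInsertBy_pairwise (x : List Int) (acc : List (List Int))
    (h : acc.Pairwise (fun a b => pvBefore b a = false)) :
    (PySem.List.insertBy pvBefore x acc).Pairwise (fun a b => pvBefore b a = false) := by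
  induction acc with
  | nil => simp [PySem.List.insertBy]
  | cons y ys ih =>
    rw [List.pairwise_cons] at h
    obtain ⟨hy, hys⟩ := h
    by_cases hb : pvBefore x y = true
    · rw [show PySem.List.insertBy pvBefore x (y :: ys) = x :: y :: ys from by
        simp [PySem.List.insertBy, hb]]
      refine List.Pairwise.cons ?_ (List.Pairwise.cons hy hys)
      intro z hz
      rcases List.mem_cons.mp hz with rfl | hz'
      · exact pvBefore_asymm hb
      · exact pvBefore_trans' hb (hy z hz')
    · rw [show PySem.List.insertBy pvBefore x (y :: ys) = y :: PySem.List.insertBy pvBefore x ys from by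
        simp [PySem.List.insertBy, hb]]
      refine List.Pairwise.cons ?_ (ih hys)
      intro z hz
      rcases (PySem.List.mem_insertBy pvBefore x z ys).mp hz with rfl | hz'
      · exact Bool.not_eq_true _ ▸ hb
      · exact hy z hz'

lemma pvFold_insertBy_pairwise (l : List (List Int)) :
    ∀ acc, acc.Pairwise (fun a b => pvBefore b a = false) →
    (l.foldl (fun acc x => PySem.List.insertBy pvBefore x acc) acc).Pairwise
      (fun a b => pvBefore b a = false) := by
  induction l with
  | nil => intro acc h; simpa using h
  | cons r t ih => intro acc h; exact ih _ (pvInsertBy_pairwise r acc h)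

lemma pvSorted2_pairwise (xs : List (List Int)) :
    (PySem.List.sorted2 xs (fun x => PySem.List.pyGetD x 0 0)
      (fun x => -(PySem.List.pyGetD x 1 0)) false).Pairwise (fun a b => pvBefore b a = false) := by
  have heq : PySem.List.sorted2 xs (fun x => PySem.List.pyGetD x 0 0)
      (fun x => -(PySem.List.pyGetD x 1 0)) false
      = xs.foldl (fun acc x => PySem.List.insertBy pvBefore x acc) [] := by
    simp only [PySem.List.sorted2]
    congr 1
    funext acc x
    congr 1
    funext a b
    simp only [pvBefore, pvAtt, pvDf, neg_lt_neg_iff]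
    rfl
  rw [heq]
  exact pvFold_insertBy_pairwise xs [] List.Pairwise.nil

-- A's loop body, unfolded
lemma pvFoldA (l : List (List Int)) : ∀ (ans m : Int),
    l.foldl (fun (st : Int × Int) row =>
      (if st.2 > PySem.List.pyGetD row 1 0 then st.1 + 1 else st.1,
       max st.2 (PySem.List.pyGetD row 1 0))) (ans, m)
    = (ans + pvCnt m l, pvMax m (l.map pvDf)) := by
  induction l with
  | nil => intro ans m; simp [pvCnt, pvMax]
  | cons r t ih =>
    intro ans m
    simp only [List.foldl_cons, pvCnt, pvMax, List.map_cons, ih, Prod.mk.injEq]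
    refine ⟨?_, rfl⟩
    unfold pvDf
    split_ifs <;> ring

lemma pvMax_le {b c : Int} {vs : List Int} (hb : b ≤ c) (h : ∀ v ∈ vs, v ≤ c) :
    pvMax b vs ≤ c := by
  induction vs generalizing b with
  | nil => exact hb
  | cons v t ih =>
    unfold pvMax at *
    simp only [List.foldl_cons]
    exact ih (max_le hb (h v List.mem_cons_self)) (fun w hw => h w (List.mem_cons_of_mem _ hw))

lemma pvMax_max (c : Int) (vs : List Int) : ∀ b, pvMax (max b c) vs = max (pvMax b vs) c := by
  induction vs with
  | nil => intro b; rfl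
  | cons v t ih =>
    intro b
    unfold pvMax at *
    simp only [List.foldl_cons]
    rw [max_right_comm b c v, ih]

lemma pvBig_max (m c : Int) (l : List (List Int)) (q : Int) :
    pvBig (max m c) l q = max (pvBig m l q) c := by
  unfold pvBig
  exact pvMax_max c _ m

lemma pvBig_cons_head (m : Int) (r : List Int) (t : List (List Int))
    (h : ∀ y ∈ t, pvRel r y) : pvBig m (r :: t) (pvAtt r) = m := by
  unfold pvBig
  rw [List.filter_eq_nil_iff.mpr ?_]
  · rfl
  · intro a ha
    rcases List.mem_cons.mp ha with rfl | ha'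
    · simp
    · have := h a ha'
      unfold pvRel at this
      simp only [decide_eq_true_eq]
      omega

lemma pvCnt_eq_countP (R : List (List Int)) (hpw : R.Pairwise pvRel) : ∀ m,
    pvCnt m R = ((R.countP (fun s => decide (pvDf s < pvBig m R (pvAtt s)))) : Int) := by
  induction R with
  | nil => intro m; simp [pvCnt]
  | cons r t ih =>
    intro m
    rw [List.pairwise_cons] at hpw
    obtain ⟨hr, ht⟩ := hpw
    have hhead : pvBig m (r :: t) (pvAtt r) = m := pvBig_cons_head m r t hr
    have htail : ∀ s ∈ t,
        pvBig m (r :: t) (pvAtt s) = pvBig (max m (pvDf r)) t (pvAtt s) ∨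
        (pvBig m (r :: t) (pvAtt s) = pvBig m t (pvAtt s) ∧ pvDf r ≤ pvDf s) := by
      intro s hs
      by_cases hlt : pvAtt s < pvAtt r
      · left
        unfold pvBig
        rw [List.filter_cons, if_pos (by simpa using hlt), List.map_cons]
        rfl
      · right
        have hrel := hr s hs
        unfold pvRel at hrel
        refine ⟨?_, by omega⟩
        unfold pvBig
        rw [List.filter_cons, if_neg (by simpa using hlt)]
    have hcongr : t.countP (fun s => decide (pvDf s < pvBig (max m (pvDf r)) t (pvAtt s)))
        = t.countP (fun s => decide (pvDf s < pvBig m (r :: t) (pvAtt s))) := by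
      apply List.countP_congr
      intro s hs
      simp only [decide_eq_true_eq]
      rcases htail s hs with h1 | ⟨h1, h2⟩
      · rw [h1]
      · rw [h1, pvBig_max, lt_max_iff]
        omega
    simp only [pvCnt, List.countP_cons]
    rw [ih ht (max m (pvDf r)), hcongr]
    simp only [hhead, decide_eq_true_eq]
    push_cast
    split_ifs <;> omega

-- transfer of pvBig along permutations
lemma pvBig_perm {l1 l2 : List (List Int)} (h : l1.Perm l2) (m q : Int) :
    pvBig m l1 q = pvBig m l2 q := by
  unfold pvBig pvMax
  exact List.Perm.foldl_eq (rcomm := ⟨fun b a1 a2 => max_right_comm b a1 a2⟩)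
    ((h.filter _).map _) m

-- pvG is pvGm's content at one key
lemma pvGm_fold_get? (props : List (List Int)) : ∀ (d : PySem.Dict Int Int) (q : Int),
    (props.foldl (fun (d : PySem.Dict Int Int) r =>
      d.insert (PySem.List.pyGetD r 0 0)
        (max (d.getD (PySem.List.pyGetD r 0 0) (PySem.List.pyGetD r 1 0)) (PySem.List.pyGetD r 1 0))) d).get? q
    = pvG (d.get? q) props q := by
  induction props with
  | nil => intro d q; rfl
  | cons r t ih =>
    intro d q
    simp only [List.foldl_cons, pvG] at *
    rw [ih]
    congr 1
    rw [PySem.Dict.get?_insert]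
    by_cases hq : pvAtt r = q
    · subst hq
      rw [if_pos (show pvAtt r = PySem.List.pyGetD r 0 0 from rfl), if_pos rfl,
        PySem.Dict.getD_eq_get?_getD]
      rfl
    · rw [if_neg (by simp only [pvAtt] at hq; exact fun he => hq he.symm), if_neg hq]

lemma pvGm_get? (props : List (List Int)) (q : Int) :
    (pvGm props).get? q = pvG none props q := by
  unfold pvGm
  rw [pvGm_fold_get?]
  rfl

lemma pvG_some_ub {q v : Int} {l : List (List Int)} : ∀ {o : Option Int},
    pvG o l q = some v →
    (∀ w, o = some w → w ≤ v) ∧ ∀ r ∈ l, pvAtt r = q → pvDf r ≤ v := by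
  induction l with
  | nil =>
    intro o h
    simp only [pvG, List.foldl_nil] at h
    exact ⟨fun w hw => by rw [hw] at h; injection h with h'; omega, by simp⟩
  | cons r t ih =>
    intro o h
    simp only [pvG, List.foldl_cons] at h
    have h' := ih h
    constructor
    · intro w hw
      by_cases hq : pvAtt r = q
      · have hm := h'.1 (max (o.getD (pvDf r)) (pvDf r)) (by rw [if_pos hq])
        rw [hw] at hm
        simp only [Option.getD_some] at hm
        exact le_trans (le_max_left _ _) hm
      · exact h'.1 w (by rw [if_neg hq]; exact hw)
    · intro r' hr' hq'
      rcases List.mem_cons.mp hr' with rfl | hm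
      · have hm := h'.1 (max (o.getD (pvDf r')) (pvDf r')) (by rw [if_pos hq'])
        exact le_trans (le_max_right _ _) hm
      · exact h'.2 r' hm hq'

lemma pvG_some_attained {q v : Int} {l : List (List Int)} : ∀ {o : Option Int},
    pvG o l q = some v → o = some v ∨ ∃ r ∈ l, pvAtt r = q ∧ pvDf r = v := by
  induction l with
  | nil =>
    intro o h
    simp only [pvG, List.foldl_nil] at h
    exact Or.inl h
  | cons r t ih =>
    intro o h
    simp only [pvG, List.foldl_cons] at h
    rcases ih h with ho | ⟨r', hr', hq', hd'⟩
    · by_cases hq : pvAtt r = q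
      · rw [if_pos hq] at ho
        injection ho with ho'
        cases o with
        | none =>
          simp only [Option.getD_none, max_self] at ho'
          exact Or.inr ⟨r, List.mem_cons_self, hq, ho'⟩
        | some w =>
          simp only [Option.getD_some] at ho'
          rcases max_choice w (pvDf r) with hc | hc
          · exact Or.inl (by rw [← ho', hc])
          · exact Or.inr ⟨r, List.mem_cons_self, hq, by omega⟩
      · rw [if_neg hq] at ho
        exact Or.inl ho
    · exact Or.inr ⟨r', List.mem_cons_of_mem _ hr', hq', hd'⟩

lemma pvG_none {q : Int} {l : List (List Int)} : ∀ {o : Option Int},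
    pvG o l q = none → o = none ∧ ∀ r ∈ l, pvAtt r ≠ q := by
  induction l with
  | nil => intro o h; exact ⟨h, by simp⟩
  | cons r t ih =>
    intro o h
    simp only [pvG, List.foldl_cons] at h
    have h' := ih h
    by_cases hq : pvAtt r = q
    · rw [if_pos hq] at h'
      exact absurd h'.1 (by simp)
    · rw [if_neg hq] at h'
      refine ⟨h'.1, ?_⟩
      intro r' hr'
      rcases List.mem_cons.mp hr' with rfl | hm
      · exact hq
      · exact h'.2 r' hm

lemma pvGm_some {props : List (List Int)} {q : Int} (hq : q ∈ props.map pvAtt) :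
    ∃ w, (pvGm props).get? q = some w := by
  cases h : (pvGm props).get? q with
  | some w => exact ⟨w, rfl⟩
  | none =>
    rw [pvGm_get?] at h
    obtain ⟨r, hr, rfl⟩ := List.mem_map.mp hq
    exact absurd rfl ((pvG_none h).2 r hr)

lemma pvGm_keys (props : List (List Int)) :
    (pvGm props).keys = PySem.Set.ofList (props.map pvAtt) := by
  unfold pvGm
  rw [PySem.Dict.keys_foldl_insert_key props (fun r => PySem.List.pyGetD r 0 0)
    (fun d r => max (d.getD (PySem.List.pyGetD r 0 0) (PySem.List.pyGetD r 1 0)) (PySem.List.pyGetD r 1 0))]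
  simp only [PySem.Dict.keys_empty, PySem.Set.update, PySem.Set.ofList]
  rfl

lemma pvGm_keys_nodup (props : List (List Int)) : (pvGm props).keys.Nodup := by
  unfold pvGm
  exact PySem.Dict.nodup_keys_foldl_insert_key props (fun r => PySem.List.pyGetD r 0 0)
    (fun d r => max (d.getD (PySem.List.pyGetD r 0 0) (PySem.List.pyGetD r 1 0)) (PySem.List.pyGetD r 1 0))
    PySem.Dict.empty (by simp [PySem.Dict.keys_empty])

lemma pvKs_pairwise (props : List (List Int)) : (pvKs props).Pairwise (fun a b => b < a) := by
  have h1 : (pvKs props).Pairwise (fun a b => b ≤ a) :=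
    PySem.List.sorted_pairwise_rev (pvGm props).keys (fun k => k)
  have h2 : (pvKs props).Nodup :=
    ((PySem.List.sorted_perm (pvGm props).keys (fun k => k) true).nodup_iff).mpr (pvGm_keys_nodup props)
  exact (h1.and h2).imp (fun {a b} hab => lt_of_le_of_ne hab.1 (Ne.symm hab.2))

lemma pvSmFold_getD_notmem (g : Int → Int) (K : List Int) : ∀ (st : PySem.Dict Int Int × Int) (q : Int), q ∉ K →
    ((K.foldl (fun st a => (st.1.insert a st.2, max st.2 (g a))) st).1).getD q 0 = st.1.getD q 0 := by
  induction K with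
  | nil => intro st q _; rfl
  | cons k K' ih =>
    intro st q hq
    simp only [List.foldl_cons]
    rw [ih _ q (fun hm => hq (List.mem_cons_of_mem _ hm))]
    rw [PySem.Dict.getD_insert, if_neg (fun he => hq (by rw [he]; exact List.mem_cons_self))]

lemma pvSmFold_getD_mem (g : Int → Int) (K : List Int) : K.Pairwise (fun a b => b < a) →
    ∀ (st : PySem.Dict Int Int × Int) (q : Int), q ∈ K →
    ((K.foldl (fun st a => (st.1.insert a st.2, max st.2 (g a))) st).1).getD q 0
    = pvMax st.2 ((K.filter (fun k => decide (q < k))).map g) := by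
  induction K with
  | nil => intro _ st q hq; exact absurd hq (List.not_mem_nil)
  | cons k K' ih =>
    intro hpw st q hq
    rw [List.pairwise_cons] at hpw
    obtain ⟨hk, hK'⟩ := hpw
    rcases List.mem_cons.mp hq with rfl | hq'
    · simp only [List.foldl_cons]
      rw [pvSmFold_getD_notmem g K' _ q (fun hm => lt_irrefl q (hk q hm))]
      rw [PySem.Dict.getD_insert, if_pos rfl]
      rw [List.filter_cons, if_neg (by simp)]
      rw [List.filter_eq_nil_iff.mpr (fun a ha => by
        simp only [decide_eq_true_eq]
        have := hk a ha
        omega)]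
      rfl
    · simp only [List.foldl_cons]
      rw [ih hK' _ q hq']
      rw [List.filter_cons, if_pos (by simp only [decide_eq_true_eq]; exact hk q hq'), List.map_cons]
      rfl

lemma pvSm_getD (props : List (List Int)) {q : Int} (hq : q ∈ props.map pvAtt) :
    (pvSm props).1.getD q 0 = pvBig 0 props q := by
  have hkeys : q ∈ (pvGm props).keys := by
    rw [pvGm_keys]
    exact (PySem.Set.mem_ofList _ _).mpr hq
  have hks : q ∈ pvKs props := (PySem.List.mem_sorted _ _ _ _).mpr hkeys
  unfold pvSm
  rw [pvSmFold_getD_mem (fun k => (pvGm props).getD k 0) (pvKs props) (pvKs_pairwise props)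
    (PySem.Dict.empty, 0) q hks]
  apply le_antisymm
  · apply pvMax_le
    · exact (PySem.List.le_foldl_max _ _).1
    · intro v hv
      obtain ⟨k, hkf, rfl⟩ := List.mem_map.mp hv
      obtain ⟨hkmem, hklt⟩ := List.mem_filter.mp hkf
      simp only [decide_eq_true_eq] at hklt
      have hkkeys : k ∈ (pvGm props).keys := (PySem.List.mem_sorted _ _ _ _).mp hkmem
      have hkatt : k ∈ props.map pvAtt := by
        rw [pvGm_keys] at hkkeys
        exact (PySem.Set.mem_ofList _ _).mp hkkeys
      obtain ⟨w, hw⟩ := pvGm_some hkatt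
      rw [PySem.Dict.getD_of_get?_eq_some _ _ hw]
      rw [pvGm_get?] at hw
      rcases pvG_some_attained hw with hc | ⟨r, hr, hra, hrd⟩
      · exact absurd hc (by simp)
      · rw [← hrd]
        refine (PySem.List.le_foldl_max _ _).2 _ ?_
        exact List.mem_map.mpr ⟨r, List.mem_filter.mpr ⟨hr, by simp only [decide_eq_true_eq]; omega⟩, rfl⟩
  · apply pvMax_le
    · exact (PySem.List.le_foldl_max _ _).1
    · intro v hv
      obtain ⟨r, hrf, rfl⟩ := List.mem_map.mp hv
      obtain ⟨hrmem, hrlt⟩ := List.mem_filter.mp hrf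
      simp only [decide_eq_true_eq] at hrlt
      have hkatt : pvAtt r ∈ props.map pvAtt := List.mem_map_of_mem hrmem
      obtain ⟨w, hw⟩ := pvGm_some hkatt
      have hub : pvDf r ≤ w := by
        rw [pvGm_get?] at hw
        exact (pvG_some_ub hw).2 r hrmem rfl
      have hkks : pvAtt r ∈ pvKs props := by
        refine (PySem.List.mem_sorted _ _ _ _).mpr ?_
        rw [pvGm_keys]
        exact (PySem.Set.mem_ofList _ _).mpr hkatt
      have hwle : (pvGm props).getD (pvAtt r) 0 ≤
          pvMax 0 (((pvKs props).filter (fun k => decide (q < k))).map (fun k => (pvGm props).getD k 0)) := by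
        refine (PySem.List.le_foldl_max _ _).2 _ ?_
        exact List.mem_map.mpr ⟨pvAtt r,
          List.mem_filter.mpr ⟨hkks, by simp only [decide_eq_true_eq]; omega⟩, rfl⟩
      rw [PySem.Dict.getD_of_get?_eq_some _ _ hw] at hwle
      exact le_trans hub hwle

lemma pvA_eq (props : List (List Int)) : numberOfWeakCharacters props
    = ((props.countP (fun s => decide (pvDf s < pvBig 0 props (pvAtt s)))) : Int) := by
  unfold numberOfWeakCharacters
  simp only [PySem.List.slice?_none_none_neg_one, Option.getD_some, pvFoldA]
  have hpw : (PySem.List.sorted2 props (fun x => PySem.List.pyGetD x 0 0)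
      (fun x => -(PySem.List.pyGetD x 1 0)) false).reverse.Pairwise pvRel := by
    rw [List.pairwise_reverse]
    exact (pvSorted2_pairwise props).imp (fun {a b} h => (pvBefore_false_iff b a).mp h)
  rw [pvCnt_eq_countP _ hpw 0]
  have hperm : (PySem.List.sorted2 props (fun x => PySem.List.pyGetD x 0 0)
      (fun x => -(PySem.List.pyGetD x 1 0)) false).reverse.Perm props :=
    (List.reverse_perm _).trans (PySem.List.sorted2_perm props _ _ false)
  have hbig : ∀ s, pvBig 0 (PySem.List.sorted2 props (fun x => PySem.List.pyGetD x 0 0)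
      (fun x => -(PySem.List.pyGetD x 1 0)) false).reverse (pvAtt s) = pvBig 0 props (pvAtt s) :=
    fun s => pvBig_perm hperm 0 (pvAtt s)
  simp only [hbig]
  rw [List.Perm.countP_eq _ hperm]
  omega

lemma pvB_eq (props : List (List Int)) : numberOfWeakCharacters_alt props
    = ((props.countP (fun r => decide (pvDf r < (pvSm props).1.getD (pvAtt r) 0))) : Int) := by
  show props.foldl (fun (acc : Int) r =>
      if pvDf r < ((pvSm props).1).getD (pvAtt r) 0
      then acc + 1 else acc) 0 = _
  rw [PySem.List.foldl_ite_add_one (p := fun r => pvDf r < (pvSm props).1.getD (pvAtt r) 0)]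
  omega

theorem pv_main (props : List (List Int)) :
    numberOfWeakCharacters props = numberOfWeakCharacters_alt props := by
  rw [pvA_eq, pvB_eq]
  congr 1
  apply List.countP_congr
  intro r hr
  simp only [decide_eq_true_eq]
  rw [pvSm_getD props (List.mem_map_of_mem hr)]

-- ===== VERDICT (by name: the statement is the Claim_ definition above) =====
theorem numberOfWeakCharacters_spec : Claim_equal_numberOfWeakCharacters := by
  intro properties _ _
  unfold Spec_numberOfWeakCharacters
  exact pv_main properties
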